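-- pv_equiv track=rewrite | github.com/NeoMOSPAT/NeoMOSPAT_PAPILA | src/common.py | rename_groups
-- ===== SOURCE A (Python) =====
-- def rename_groups(c_ObsNetwork):
--     ################
--     ## Rename repeated observations networks
--     ## Adds _1 or _2 to names
--     #breakpoint()
--     Net_set=list(set(c_ObsNetwork))
--     New_names=[]
--     count=[0 for x in range(len(Net_set))]
--     for network in c_ObsNetwork:
--         index=Net_set.index(network)
--         counter=count[index]+1
--         count[index]=counter
--         if network is None:
--             New_names.append(None)
--         else:
--             New_names.append(network+"_"+str(counter))
--
--     return New_names
-- ===== SOURCE B (Python) =====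
-- def rename_groups(c_ObsNetwork):
--     # Group indices by network name (insertion order), then scatter numbered
--     # names back into a preallocated result list.
--     groups = {}
--     for i, name in enumerate(c_ObsNetwork):
--         groups.setdefault(name, []).append(i)
--     result = [None] * len(c_ObsNetwork)
--     for name, positions in groups.items():
--         if name is not None:
--             for k, pos in enumerate(positions, 1):
--                 result[pos] = name + "_" + str(k)
--     return result
-- ===== Notes on version B (the rewrite author's own statement) =====
-- stated objective: faster
-- what changed: A makes one sequential pass keeping a running counter per network found via list(set(..)).index on every element; B instead groups the positions of each name into a dict in one pass and then scatters 'name_k' values into a preallocated result list, group by group.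
import Mathlib
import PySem

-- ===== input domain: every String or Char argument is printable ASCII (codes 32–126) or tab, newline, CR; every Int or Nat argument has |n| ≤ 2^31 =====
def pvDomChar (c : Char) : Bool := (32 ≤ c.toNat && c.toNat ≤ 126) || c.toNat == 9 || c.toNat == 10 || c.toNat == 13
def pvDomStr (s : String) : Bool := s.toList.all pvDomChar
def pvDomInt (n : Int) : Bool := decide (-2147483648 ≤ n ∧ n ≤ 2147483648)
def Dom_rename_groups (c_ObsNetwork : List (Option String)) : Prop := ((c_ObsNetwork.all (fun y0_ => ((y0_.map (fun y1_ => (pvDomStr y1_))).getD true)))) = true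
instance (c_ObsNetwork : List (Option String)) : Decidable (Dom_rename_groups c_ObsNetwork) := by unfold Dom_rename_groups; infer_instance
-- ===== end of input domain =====

-- B replaces A's sequential pass with per-name counters (via list(set)+.index) by a
-- group-positions-by-name-then-scatter decomposition; objective: faster (no .index scan per element).

-- ===== PORT A =====
-- loop body of A's 'for network in c_ObsNetwork' (st = (count, New_names));
-- the 'none' branch of index? is unreachable: every element of c is in list(set(c)).
def pvStepA (netSet : List (Option String)) (st : List Int × List (Option String))
    (network : Option String) : List Int × List (Option String) :=
  match PySem.List.index? netSet network with
  | none => st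
  | some idx =>
    let counter : Int := st.1.getD idx 0 + 1   -- count[index]+1; idx < len(count) always
    (st.1.set idx counter,
     match network with
     | none => st.2 ++ [none]
     | some s => st.2 ++ [some (s ++ "_" ++ PySem.Int.toStr counter)])

-- A's result does not depend on the iteration order of set(c_ObsNetwork), so
-- Net_set = list(set(c_ObsNetwork)) is modelled by PySem.Set.ofList.
def rename_groups (c_ObsNetwork : List (Option String)) : List (Option String) :=
  let netSet : List (Option String) := PySem.Set.ofList c_ObsNetwork
  (c_ObsNetwork.foldl (pvStepA netSet)
    (List.replicate netSet.length (0 : Int), ([] : List (Option String)))).2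

-- ===== PORT B =====
-- phase 1: groups.setdefault(name, []).append(i)  ≡  groups[name] = groups.get(name, []) + [i]  = Dict.modify
-- phase 2: scatter 'name + "_" + str(k)' into result[pos]; result[pos]= is always in range (pySetD).
def rename_groups_alt (c_ObsNetwork : List (Option String)) : List (Option String) :=
  let groups : PySem.Dict (Option String) (List Int) :=
    (PySem.List.enumerate c_ObsNetwork 0).foldl
      (fun d p => d.modify p.2 [] (· ++ [p.1])) PySem.Dict.empty
  groups.items.foldl
    (fun res g =>
      match g.1 with
      | none => res
      | some s =>
        (PySem.List.enumerate g.2 1).foldl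
          (fun r kp => PySem.List.pySetD r kp.2 (some (s ++ "_" ++ PySem.Int.toStr kp.1))) res)
    (List.replicate c_ObsNetwork.length (none : Option String))

-- ===== PRECONDITION & SPEC =====
def Spec_rename_groups (c_ObsNetwork : List (Option String)) (out : List (Option String)) : Prop := out = rename_groups_alt c_ObsNetwork
instance (c_ObsNetwork : List (Option String)) (out : List (Option String)) : Decidable (Spec_rename_groups c_ObsNetwork out) := by unfold Spec_rename_groups; infer_instance

-- ===== CLAIM (what is proved, stated in full; the proofs are below) =====
def Claim_equal_rename_groups : Prop := ∀ (c_ObsNetwork : List (Option String)), Dom_rename_groups c_ObsNetwork → Spec_rename_groups c_ObsNetwork (rename_groups c_ObsNetwork)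

-- ===== LEMMAS AND PROOFS =====

-- canonical value: element x at position i gets suffix (number of occurrences of x up to i)
def pvRender (x : Option String) (k : Nat) : Option String :=
  match x with
  | none => none
  | some s => some (s ++ "_" ++ PySem.Int.toStr (k : Int))

def pvCanon (seen : List (Option String)) : List (Option String) → List (Option String)
  | [] => []
  | x :: xs => pvRender x (seen.count x + 1) :: pvCanon (seen ++ [x]) xs

-- positions (as Python ints) of name x in cs, in order
def pvPosns (x : Option String) (cs : List (Option String)) : List Int :=
  ((((PySem.List.enumerate cs 0).map Prod.swap).filter (fun p => p.1 == x)).map (·.2))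

-- B's per-group scatter, as a function of the key
def pvScatterKey (cs : List (Option String)) (res : List (Option String))
    (k : Option String) : List (Option String) :=
  match k with
  | none => res
  | some s =>
    (PySem.List.enumerate (pvPosns (some s) cs) 1).foldl
      (fun r kp => PySem.List.pySetD r kp.2 (some (s ++ "_" ++ PySem.Int.toStr kp.1))) res

lemma pvCanon_getElem? (cs seen : List (Option String)) (i : Nat) :
    (pvCanon seen cs)[i]? = cs[i]?.map (fun x => pvRender x (seen.count x + (cs.take (i+1)).count x)) := by
  induction cs generalizing seen i with
  | nil => simp [pvCanon]
  | cons x xs ih =>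
    cases i with
    | zero => simp [pvCanon]
    | succ i =>
      simp only [pvCanon, List.getElem?_cons_succ, ih]
      cases hx : xs[i]? with
      | none => simp
      | some y =>
        simp only [Option.map_some, List.count_append, List.count_cons,
          List.take_succ_cons, List.count_nil, beq_iff_eq]
        by_cases h : x = y
        · simp [h]
          have h2 : List.count y seen + 1 + List.count y (List.take (i + 1) xs)
              = List.count y seen + (List.count y (List.take (i + 1) xs) + 1) := by omega
          rw [h2]
        · simp [h]

lemma pvA_inv (net : List (Option String)) (hnd : net.Nodup) :
    ∀ (l seen : List (Option String)) (cnt : List Int) (acc : List (Option String)),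
      (∀ x ∈ l, x ∈ net) → cnt.length = net.length →
      (∀ j (hj : j < net.length), cnt.getD j 0 = (seen.count net[j] : Int)) →
      (l.foldl (pvStepA net) (cnt, acc)).2 = acc ++ pvCanon seen l := by
  intro l
  induction l with
  | nil => intro seen cnt acc _ _ _; simp [pvCanon]
  | cons x xs ih =>
    intro seen cnt acc hmem hlen hinv
    have hx : x ∈ net := hmem x (by simp)
    obtain ⟨k, hk⟩ := Option.isSome_iff_exists.mp ((PySem.List.index?_isSome_iff net x).mpr hx)
    obtain ⟨hklt, hnetk, -⟩ := PySem.List.getElem_of_index?_eq_some hk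
    have hc : cnt.getD k 0 = (seen.count x : Int) := by
      have h := hinv k hklt; rw [hnetk] at h; exact h
    have hc2 := hc
    rw [List.getD_eq_getElem?_getD] at hc2
    have hstep : pvStepA net (cnt, acc) x =
        (cnt.set k ((seen.count x : Int) + 1), acc ++ [pvRender x (seen.count x + 1)]) := by
      unfold pvStepA
      rw [hk]
      cases x with
      | none => simp [hc2, pvRender]
      | some s =>
        simp only [pvRender]
        rw [hc]
        have h3 : ((seen.count (some s) + 1 : Nat) : Int) = (seen.count (some s) : Int) + 1 := by
          push_cast; ring
        rw [h3]
    have hinv' : ∀ j (hj : j < net.length),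
        (cnt.set k ((seen.count x : Int) + 1)).getD j 0 = (((seen ++ [x]).count net[j] : Nat) : Int) := by
      intro j hj
      by_cases hjk : j = k
      · subst hjk
        rw [List.getD_eq_getElem?_getD, List.getElem?_set_self (by omega)]
        simp only [Option.getD_some, hnetk, List.count_append]
        have : List.count x [x] = 1 := by simp
        rw [this]
        push_cast; ring
      · rw [List.getD_eq_getElem?_getD, List.getElem?_set_ne (by omega),
          ← List.getD_eq_getElem?_getD, hinv j hj]
        have hne : net[j] ≠ x := by
          intro hcon
          exact hjk ((List.Nodup.getElem_inj_iff hnd).mp (hcon.trans hnetk.symm))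
        have hne2 : ¬ x = net[j] := fun h => hne h.symm
        simp [List.count_append, hne2]
    simp only [List.foldl_cons, hstep]
    rw [ih (seen ++ [x]) _ _ (fun z hz => hmem z (by simp [hz])) (by simpa using hlen) hinv']
    simp [pvCanon]

lemma pvA_eq_canon (cs : List (Option String)) : rename_groups cs = pvCanon [] cs := by
  have h := pvA_inv (PySem.Set.ofList cs) (PySem.Set.nodup_ofList cs) cs []
    (List.replicate (PySem.Set.ofList cs).length 0) []
    (fun x hx => (PySem.Set.mem_ofList cs x).mpr hx)
    (by simp)
    (by intro j hj; simp)
  simpa [rename_groups] using h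

lemma pvPosns_append (x y : Option String) (cs : List (Option String)) :
    pvPosns x (cs ++ [y]) = pvPosns x cs ++ (if y == x then [(cs.length : Int)] else []) := by
  unfold pvPosns
  rw [PySem.List.enumerate_append]
  simp only [PySem.List.enumerate_cons, PySem.List.enumerate_nil, List.map_append,
    List.filter_append, List.map_append]
  by_cases h : y = x <;> simp [h, Prod.swap]

lemma pvPosnsAux_length (x : Option String) (cs : List (Option String)) :
    ∀ (st : Int), ((((PySem.List.enumerate cs st).map Prod.swap).filter
      (fun p => p.1 == x)).map (·.2)).length = cs.count x := by
  induction cs with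
  | nil => intro st; simp [PySem.List.enumerate_nil]
  | cons z zs ih =>
    intro st
    simp only [PySem.List.enumerate_cons, List.map_cons, List.filter_cons, List.count_cons]
    by_cases h : z = x <;> simp [h, Prod.swap, ih]

lemma pvPosns_length (x : Option String) (cs : List (Option String)) :
    (pvPosns x cs).length = cs.count x := pvPosnsAux_length x cs 0

lemma pvSetFold_length (l : List (Int × Int)) (f : Int → Option String) (res : List (Option String)) :
    (l.foldl (fun r kp => PySem.List.pySetD r kp.2 (f kp.1)) res).length = res.length := by
  induction l generalizing res with
  | nil => rfl
  | cons p ps ih => simp [ih, PySem.List.length_pySetD]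

lemma pvInner_spec (s : String) (cs' : List (Option String)) :
    ∀ (res : List (Option String)), cs'.length ≤ res.length → ∀ (i : Nat),
    ((PySem.List.enumerate (pvPosns (some s) cs') 1).foldl
      (fun r kp => PySem.List.pySetD r kp.2 (some (s ++ "_" ++ PySem.Int.toStr kp.1))) res)[i]? =
    if cs'[i]? = some (some s) then some (pvRender (some s) ((cs'.take (i+1)).count (some s))) else res[i]? := by
  induction cs' using List.reverseRecOn with
  | nil => intro res _ i; simp [pvPosns, PySem.List.enumerate_nil]
  | append_singleton cs' y ih =>
    intro res hlen i
    rw [pvPosns_append]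
    by_cases hy : y = some s
    · subst hy
      rw [if_pos (by simp)]
      rw [PySem.List.enumerate_append, List.foldl_append]
      simp only [PySem.List.enumerate_cons, PySem.List.enumerate_nil, List.foldl_cons,
        List.foldl_nil]
      rw [PySem.List.pySetD_natCast]
      have hlt : cs'.length < res.length := by simp at hlen; omega
      have hplen := pvSetFold_length (PySem.List.enumerate (pvPosns (some s) cs') 1)
        (fun k => some (s ++ "_" ++ PySem.Int.toStr k)) res
      by_cases hi : i = cs'.length
      · subst hi
        rw [List.getElem?_set_self (by omega)]
        rw [if_pos (by simp)]
        simp only [pvRender]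
        have harg : (1 + ((pvPosns (some s) cs').length : Int)) =
            ((List.count (some s) (List.take (cs'.length + 1) (cs' ++ [some s])) : Nat) : Int) := by
          rw [pvPosns_length]
          rw [List.take_of_length_le (by simp)]
          simp [List.count_append]
          ring
        rw [harg]
      · rw [List.getElem?_set_ne (fun h => hi h.symm)]
        rw [ih res (by omega) i]
        by_cases hilt : i < cs'.length
        · rw [List.getElem?_append_left hilt, List.take_append_of_le_length (by omega)]
        · have h1 : cs'[i]? = none := by rw [List.getElem?_eq_none_iff]; omega
          have h2 : (cs' ++ [some s])[i]? = none := by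
            rw [List.getElem?_eq_none_iff]; simp; omega
          simp [h1, h2]
    · rw [if_neg (by simpa using hy), List.append_nil]
      rw [ih res (by simp at hlen; omega) i]
      by_cases hilt : i < cs'.length
      · rw [List.getElem?_append_left hilt, List.take_append_of_le_length (by omega)]
      · have h1 : cs'[i]? = none := by rw [List.getElem?_eq_none_iff]; omega
        rw [h1, if_neg (by simp)]
        by_cases hieq : i = cs'.length
        · subst hieq
          have h2 : (cs' ++ [y])[cs'.length]? = some y := by simp
          rw [h2, if_neg (by simpa using hy)]
        · have h2 : (cs' ++ [y])[i]? = none := by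
            rw [List.getElem?_eq_none_iff]; simp; omega
          rw [h2]; simp

lemma pvScatterKey_length (cs res : List (Option String)) (k : Option String) :
    (pvScatterKey cs res k).length = res.length := by
  cases k with
  | none => rfl
  | some s =>
    exact pvSetFold_length (PySem.List.enumerate (pvPosns (some s) cs) 1)
      (fun k => some (s ++ "_" ++ PySem.Int.toStr k)) res

lemma pvScatterKey_get? (cs res : List (Option String)) (k : Option String)
    (hlen : cs.length ≤ res.length) (i : Nat) :
    (pvScatterKey cs res k)[i]? =
    if cs[i]? = some k ∧ k ≠ none then (pvCanon [] cs)[i]? else res[i]? := by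
  cases k with
  | none => simp [pvScatterKey]
  | some s =>
    show ((PySem.List.enumerate (pvPosns (some s) cs) 1).foldl
      (fun r kp => PySem.List.pySetD r kp.2 (some (s ++ "_" ++ PySem.Int.toStr kp.1))) res)[i]? = _
    rw [pvInner_spec s cs res hlen i]
    rw [pvCanon_getElem?]
    by_cases h : cs[i]? = some (some s)
    · rw [if_pos h, if_pos (by simp [h])]
      simp [h]
    · rw [if_neg h, if_neg (by simp [h])]

lemma pvOuter (cs : List (Option String)) (ks : List (Option String)) :
    ∀ (res : List (Option String)), cs.length ≤ res.length → ∀ (i : Nat),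
    (ks.foldl (pvScatterKey cs) res)[i]? =
    if (∃ x ∈ ks, cs[i]? = some x ∧ x ≠ none) then (pvCanon [] cs)[i]? else res[i]? := by
  induction ks with
  | nil => intro res _ i; simp
  | cons k ks ih =>
    intro res hlen i
    simp only [List.foldl_cons]
    rw [ih (pvScatterKey cs res k) (by rw [pvScatterKey_length]; exact hlen) i]
    rw [pvScatterKey_get? cs res k hlen i]
    by_cases h1 : ∃ x ∈ ks, cs[i]? = some x ∧ x ≠ none
    · rw [if_pos h1, if_pos (by obtain ⟨x, hx, hp⟩ := h1; exact ⟨x, List.mem_cons_of_mem k hx, hp⟩)]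
    · rw [if_neg h1]
      by_cases h2 : cs[i]? = some k ∧ k ≠ none
      · rw [if_pos h2, if_pos ⟨k, List.mem_cons_self, h2⟩]
      · rw [if_neg h2, if_neg ?_]
        intro ⟨x, hx, hp⟩
        rcases List.mem_cons.mp hx with rfl | hx'
        · exact h2 hp
        · exact h1 ⟨x, hx', hp⟩

lemma pvGroups_items (cs : List (Option String)) :
    ((PySem.List.enumerate cs 0).foldl (fun d p => d.modify p.2 [] (· ++ [p.1]))
      (PySem.Dict.empty : PySem.Dict (Option String) (List Int))).items =
    (PySem.Set.ofList cs).map (fun k => (k, pvPosns k cs)) := by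
  have hswap : (PySem.List.enumerate cs 0).foldl (fun d p => d.modify p.2 [] (· ++ [p.1]))
      (PySem.Dict.empty : PySem.Dict (Option String) (List Int))
      = ((PySem.List.enumerate cs 0).map Prod.swap).foldl
        (fun d p => d.modify p.1 [] (· ++ [p.2])) PySem.Dict.empty := by
    rw [List.foldl_map]
    rfl
  rw [hswap]
  have hnd : (((PySem.List.enumerate cs 0).map Prod.swap).foldl
      (fun d p => d.modify p.1 [] (· ++ [p.2]))
      (PySem.Dict.empty : PySem.Dict (Option String) (List Int))).keys.Nodup := by
    exact PySem.Dict.nodup_keys_foldl_modify_key _ _ _ _ _ (by simp [PySem.Dict.keys_empty])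
  rw [PySem.Dict.items_eq_map_keys _ hnd []]
  have hkeys : (((PySem.List.enumerate cs 0).map Prod.swap).foldl
      (fun d p => d.modify p.1 [] (· ++ [p.2]))
      (PySem.Dict.empty : PySem.Dict (Option String) (List Int))).keys = PySem.Set.ofList cs := by
    rw [show (fun (d : PySem.Dict (Option String) (List Int)) (p : (Option String) × Int) =>
        d.modify p.1 [] (· ++ [p.2]))
      = (fun d p => d.modify ((fun (q : (Option String) × Int) => q.1) p) []
          ((fun (_ : PySem.Dict (Option String) (List Int)) (q : (Option String) × Int) =>
            (· ++ [q.2])) d p)) from rfl]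
    rw [PySem.Dict.keys_foldl_modify_key]
    simp only [PySem.Dict.keys_empty, List.map_map]
    have : ((PySem.List.enumerate cs 0).map (Prod.fst ∘ Prod.swap)) = cs := by
      have h2 : (Prod.fst ∘ (Prod.swap : Int × Option String → Option String × Int))
          = (·.2) := rfl
      rw [h2, PySem.List.map_snd_enumerate]
    rw [this]
    rfl
  rw [hkeys]
  apply List.map_congr_left
  intro k _
  rw [PySem.Dict.getD_foldl_modify_append]
  simp only [PySem.Dict.getD_empty, List.nil_append]
  rfl

lemma pvB_eq_canon (cs : List (Option String)) : rename_groups_alt cs = pvCanon [] cs := by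
  show ((((PySem.List.enumerate cs 0).foldl (fun d p => d.modify p.2 [] (· ++ [p.1]))
      (PySem.Dict.empty : PySem.Dict (Option String) (List Int)))).items.foldl _ _) = _
  rw [pvGroups_items, List.foldl_map]
  have hfun : (fun (res : List (Option String)) (k : Option String) =>
      match (k, pvPosns k cs).1 with
      | none => res
      | some s =>
        (PySem.List.enumerate (k, pvPosns k cs).2 1).foldl
          (fun r kp => PySem.List.pySetD r kp.2 (some (s ++ "_" ++ PySem.Int.toStr kp.1))) res)
      = pvScatterKey cs := by
    funext res k
    cases k <;> rfl
  rw [hfun]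
  apply List.ext_getElem?
  intro i
  rw [pvOuter cs (PySem.Set.ofList cs) (List.replicate cs.length none) (by simp) i]
  by_cases h : ∃ x ∈ PySem.Set.ofList cs, cs[i]? = some x ∧ x ≠ none
  · rw [if_pos h]
  · rw [if_neg h]
    rw [pvCanon_getElem?]
    cases hc : cs[i]? with
    | none =>
      have hi : cs.length ≤ i := List.getElem?_eq_none_iff.mp hc
      simp [Nat.not_lt.mpr hi]
    | some x =>
      have hxc : x ∈ cs := List.mem_of_getElem? hc
      have hilt : i < cs.length := (List.getElem?_eq_some_iff.mp hc).1
      have hxn : x = none := by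
        by_contra hne
        exact h ⟨x, (PySem.Set.mem_ofList cs x).mpr hxc, hc, hne⟩
      subst hxn
      simp [hilt, pvRender]

-- ===== VERDICT (by name: the statement is the Claim_ definition above) =====
theorem rename_groups_spec : Claim_equal_rename_groups := by
  intro cs _
  unfold Spec_rename_groups
  rw [pvA_eq_canon, pvB_eq_canon]
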